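-- pv_equiv track=rewrite | github.com/joni-/euler11 | euler11.py | max_product_for_numbers
-- ===== SOURCE A (Python) =====
-- def get_number_combinations(numbers, n):
--     """ Returns a list of lists of ints of length n from the given list of
--     ints such that each n length list contains adjacent numbers.
--     e.g. numbers: [1, 2, 3, 4, 5], n: 4 => [[1, 2, 3, 4], [2, 3, 4, 5]] """
--     result = []
--     start = 0
--     end = n
--     while end <= len(numbers):
--         result.append(numbers[start:end])
--         start += 1
--         end += 1
--     return result
--
-- def max_product_for_numbers(numbers, n):
--     """ Returns max product for n adjacent numbers in the given list of numbers.
--     """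
--     products = []
--     for numbers in get_number_combinations(numbers, n):
--         result = 1
--         for num in numbers:
--             result *= num
--         products.append(result)
--     return max(products)
-- ===== SOURCE B (Python) =====
-- def max_product_for_numbers(numbers, n):
--     """ Returns max product for n adjacent numbers in the given list of numbers.
--     Sliding window: maintains zero-count and product of the nonzero entries of
--     the current window, so each slide is O(1) instead of recomputing the product. """
--     zeros = 0
--     prod = 1
--     for x in numbers[:n]:
--         if x == 0:
--             zeros += 1
--         else:
--             prod *= x
--     best = prod if zeros == 0 else 0
--     for i in range(n, len(numbers)):
--         x = numbers[i]
--         y = numbers[i - n]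
--         if x == 0:
--             zeros += 1
--         else:
--             prod *= x
--         if y == 0:
--             zeros -= 1
--         else:
--             prod //= y
--         cur = prod if zeros == 0 else 0
--         if cur > best:
--             best = cur
--     return best
-- ===== Notes on version B (the rewrite author's own statement) =====
-- stated objective: faster
-- what changed: Replaces building every length-n window and recomputing each product from scratch with a single sliding window that keeps the count of zeros and the product of the nonzero entries, updating both in O(1) per slide.
-- outside the precondition, e.g. on max_product_for_numbers([1, 2, 3], -1): A returns 2, B raises IndexError
import Mathlib
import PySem

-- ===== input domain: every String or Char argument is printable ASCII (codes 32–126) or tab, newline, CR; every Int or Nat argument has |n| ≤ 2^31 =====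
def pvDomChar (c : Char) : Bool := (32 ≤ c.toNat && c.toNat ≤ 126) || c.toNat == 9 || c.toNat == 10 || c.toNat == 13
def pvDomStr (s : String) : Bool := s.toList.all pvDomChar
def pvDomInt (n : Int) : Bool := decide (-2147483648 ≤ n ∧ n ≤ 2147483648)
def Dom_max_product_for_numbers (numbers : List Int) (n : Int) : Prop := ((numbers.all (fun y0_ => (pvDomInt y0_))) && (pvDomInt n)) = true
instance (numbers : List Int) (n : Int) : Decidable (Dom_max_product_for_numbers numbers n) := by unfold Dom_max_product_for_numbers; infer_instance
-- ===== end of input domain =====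

-- B replaces per-window product recomputation by an O(1)-per-slide window (zero count + nonzero product); measured asymptotically faster.


-- ===== PORT A =====
-- while end <= len(numbers): result.append(numbers[start:end]); start += 1; end += 1
def gnc_loop (numbers : List Int) (start end_ : Int) (result : List (List Int)) : List (List Int) :=
  if _h : end_ ≤ (numbers.length : Int) then
    gnc_loop numbers (start + 1) (end_ + 1)
      (result ++ [PySem.List.slice numbers (some start) (some end_)])
  else result
termination_by ((numbers.length : Int) + 1 - end_).toNat
decreasing_by omega

def get_number_combinations (numbers : List Int) (n : Int) : List (List Int) :=
  gnc_loop numbers 0 n []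

def max_product_for_numbers (numbers : List Int) (n : Int) : Int :=
  let products := (get_number_combinations numbers n).foldl
    (fun products w => products ++ [w.foldl (fun result num => result * num) 1]) []
  -- max(products): ValueError on the empty list (excluded by Pre_), hence the default
  (PySem.List.max? products (fun x => x)).getD 0

-- ===== PORT B =====
def mpfn_step (numbers : List Int) (n : Int) (st : Int × Int × Int) (i : Int) : Int × Int × Int :=
  let x := PySem.List.pyGetD numbers i 0          -- index provably in range under Pre_
  let y := PySem.List.pyGetD numbers (i - n) 0
  let zeros1 := if x = 0 then st.1 + 1 else st.1
  let prod1  := if x = 0 then st.2.1 else st.2.1 * x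
  let zeros2 := if y = 0 then zeros1 - 1 else zeros1
  let prod2  := if y = 0 then prod1 else PySem.Int.floordiv prod1 y
  let cur := if zeros2 = 0 then prod2 else 0
  (zeros2, prod2, if cur > st.2.2 then cur else st.2.2)

def max_product_for_numbers_alt (numbers : List Int) (n : Int) : Int :=
  let zp := (PySem.List.slice numbers none (some n)).foldl
    (fun (zp : Int × Int) x => if x = 0 then (zp.1 + 1, zp.2) else (zp.1, zp.2 * x)) (0, 1)
  let best := if zp.1 = 0 then zp.2 else 0
  let fin := (PySem.List.pyRange n (numbers.length : Int) 1).foldl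
    (mpfn_step numbers n) (zp.1, zp.2, best)
  fin.2.2

-- ===== PRECONDITION & SPEC =====
-- Pre_ excludes n > len(numbers), where A raises ValueError (max of empty list), and n < 0,
-- an input outside the task's natural domain (A's value there is an accident of Python's
-- negative-end slicing) on which B itself raises IndexError.
def Pre_max_product_for_numbers (numbers : List Int) (n : Int) : Prop :=
  0 ≤ n ∧ n ≤ (numbers.length : Int)
instance (numbers : List Int) (n : Int) : Decidable (Pre_max_product_for_numbers numbers n) := by
  unfold Pre_max_product_for_numbers; infer_instance

def pvWitness_max_product_for_numbers : List Int × Int := ([1, -2, 3, 0, 4], 2)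

def Spec_max_product_for_numbers (numbers : List Int) (n : Int) (out : Int) : Prop :=
  out = max_product_for_numbers_alt numbers n
instance (numbers : List Int) (n : Int) (out : Int) : Decidable (Spec_max_product_for_numbers numbers n out) := by
  unfold Spec_max_product_for_numbers; infer_instance

-- ===== CLAIM (what is proved, stated in full; the proofs are below) =====
def Claim_equal_max_product_for_numbers : Prop := ∀ (numbers : List Int) (n : Int), Dom_max_product_for_numbers numbers n → Pre_max_product_for_numbers numbers n → Spec_max_product_for_numbers numbers n (max_product_for_numbers numbers n)


-- ===== LEMMAS AND PROOFS =====
set_option maxRecDepth 8000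
def pvWin (numbers : List Int) (m j : Nat) : List Int := (numbers.drop j).take m
def pvNZ (w : List Int) : Int := (w.filter (fun x => x ≠ 0)).prod
def pvBest (numbers : List Int) (m j : Nat) : Int :=
  ((List.range j).map (fun t => (pvWin numbers m (t + 1)).prod)).foldl max (pvWin numbers m 0).prod

theorem pv_prod_char (w : List Int) :
    w.prod = if w.count 0 = 0 then pvNZ w else 0 := by
  by_cases h : w.count 0 = 0
  · rw [if_pos h]
    unfold pvNZ
    rw [List.filter_eq_self.mpr]
    intro a ha
    simp only [ne_eq, decide_eq_true_eq]
    intro rfl0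
    subst rfl0
    exact absurd (List.count_eq_zero.mp h) (fun hz => hz ha)
  · rw [if_neg h]
    exact List.prod_eq_zero (List.count_pos_iff.mp (Nat.pos_of_ne_zero h))

theorem pv_gnc_spec (numbers : List Int) (m : Nat) :
    ∀ (k s : Nat) (acc : List (List Int)), s + m + k = numbers.length →
    gnc_loop numbers (s : Int) ((s : Int) + (m : Int)) acc
      = acc ++ (List.range (k + 1)).map (fun j => pvWin numbers m (s + j)) := by
  intro k
  induction k with
  | zero =>
    intro s acc h
    rw [gnc_loop, dif_pos (by omega), gnc_loop, dif_neg (by omega)]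
    rw [PySem.List.slice_natCast_add]
    simp [pvWin]
  | succ k ih =>
    intro s acc h
    rw [gnc_loop, dif_pos (by omega)]
    have h1 : ((s : Int) + 1) = ((s + 1 : Nat) : Int) := by push_cast; ring
    have h2 : ((s : Int) + (m : Int) + 1) = ((s + 1 : Nat) : Int) + (m : Int) := by push_cast; ring
    rw [h1, h2, ih (s + 1) _ (by omega)]
    rw [PySem.List.slice_natCast_add]
    have hr : List.range (k + 1 + 1) = 0 :: (List.range (k + 1)).map Nat.succ :=
      List.range_succ_eq_map
    have hmap : List.map (fun j => pvWin numbers m (s + 1 + j)) (List.range (k + 1))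
        = List.map (fun j => pvWin numbers m (s + Nat.succ j)) (List.range (k + 1)) :=
      List.map_congr_left (fun a _ => by
        simp only [pvWin]; rw [show s + 1 + a = s + Nat.succ a by omega])
    rw [hr]
    simp only [List.map_cons, List.map_map, List.append_assoc, List.cons_append, List.nil_append,
      Nat.add_zero, Function.comp_def]
    rw [hmap]
    simp [pvWin]

theorem pv_A_eq (numbers : List Int) (m : Nat) (h : m ≤ numbers.length) :
    max_product_for_numbers numbers (m : Int) = pvBest numbers m (numbers.length - m) := by
  unfold max_product_for_numbers get_number_combinations
  have hg := pv_gnc_spec numbers m (numbers.length - m) 0 [] (by omega)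
  simp only [Nat.cast_zero, zero_add, List.nil_append] at hg
  rw [hg, PySem.List.foldl_append_singleton_eq_map]
  have hf : (fun w : List Int => w.foldl (fun result num => result * num) 1)
      = fun w : List Int => w.prod := by
    funext w
    exact List.prod_eq_foldl.symm
  rw [List.nil_append, List.map_map, List.range_succ_eq_map, List.map_cons]
  simp only [Function.comp_def, hf]
  rw [PySem.List.max?_id_cons]
  simp only [Option.getD_some, List.map_map, pvBest]
  congr 1

theorem pv_if_gt_eq_max (a b : Int) : (if b > a then b else a) = max a b := by
  by_cases h : a < b
  · rw [if_pos h, max_eq_right h.le]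
  · rw [if_neg h, max_eq_left (not_lt.mp h)]

theorem pv_initfold (w : List Int) : ∀ (z p : Int),
    w.foldl (fun (zp : Int × Int) x => if x = 0 then (zp.1 + 1, zp.2) else (zp.1, zp.2 * x)) (z, p)
      = (z + (w.count 0 : Int), p * pvNZ w) := by
  induction w with
  | nil => intro z p; simp [pvNZ]
  | cons x t ih =>
    intro z p
    by_cases hx : x = 0
    · subst hx
      simp only [List.foldl_cons, ih, pvNZ, List.count_cons, List.filter_cons]
      norm_num

      ring
    · simp only [List.foldl_cons, if_neg hx, ih, pvNZ, List.count_cons, List.filter_cons]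
      simp [hx]
      ring

theorem pvBest_succ (numbers : List Int) (m j : Nat) :
    pvBest numbers m (j + 1) = max (pvBest numbers m j) (pvWin numbers m (j + 1)).prod := by
  unfold pvBest
  rw [List.range_succ, List.map_append, List.foldl_append]
  simp

theorem pv_step (numbers : List Int) (m j : Nat) (b : Int) (hm : 1 ≤ m)
    (hjL : m + j < numbers.length) :
    mpfn_step numbers (m : Int)
      (((pvWin numbers m j).count 0 : Int), pvNZ (pvWin numbers m j), b)
      ((m : Int) + (j : Int))
    = (((pvWin numbers m (j + 1)).count 0 : Int), pvNZ (pvWin numbers m (j + 1)),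
        max b (pvWin numbers m (j + 1)).prod) := by
  have hjlt : j < numbers.length := by omega
  have hmj : m + j < numbers.length := hjL
  have hxi : (m : Int) + (j : Int) = ((m + j : Nat) : Int) := by push_cast; ring
  have hyi : ((m + j : Nat) : Int) - (m : Int) = ((j : Nat) : Int) := by push_cast; ring
  set X := numbers[m + j]'hmj with hX
  set Y := numbers[j]'hjlt with hY
  -- window decomposition
  set mid := (numbers.drop (j + 1)).take (m - 1) with hmid
  have hd1 : pvWin numbers m j = Y :: mid := by
    unfold pvWin
    rw [List.drop_eq_getElem_cons hjlt]
    conv_lhs => rw [show m = (m - 1) + 1 by omega]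
    rw [List.take_succ_cons]
  have hd2 : pvWin numbers m (j + 1) = mid ++ [X] := by
    unfold pvWin
    conv_lhs => rw [show m = (m - 1) + 1 by omega]
    rw [List.take_add_one]
    congr 1
    rw [List.getElem?_drop, show j + 1 + (m - 1) = m + j by omega,
      List.getElem?_eq_getElem hmj]
    rfl
  have hc1 : ((pvWin numbers m j).count 0 : Int)
      = (mid.count 0 : Int) + (if Y = 0 then 1 else 0) := by
    rw [hd1, List.count_cons]
    by_cases hy : Y = 0 <;> simp [hy]
  have hc2 : ((pvWin numbers m (j + 1)).count 0 : Int)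
      = (mid.count 0 : Int) + (if X = 0 then 1 else 0) := by
    rw [hd2, List.count_append]
    by_cases hx : X = 0
    · simp [hx]
    · simp [hx]
  have hn1 : pvNZ (pvWin numbers m j) = (if Y = 0 then 1 else Y) * pvNZ mid := by
    rw [hd1]; unfold pvNZ
    rw [List.filter_cons]
    by_cases hy : Y = 0 <;> simp [hy]
  have hn2 : pvNZ (pvWin numbers m (j + 1)) = pvNZ mid * (if X = 0 then 1 else X) := by
    rw [hd2]; unfold pvNZ
    rw [List.filter_append, List.prod_append]
    by_cases hx : X = 0 <;> simp [hx]
  have hz2 : (if Y = 0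
        then (if X = 0 then ((pvWin numbers m j).count 0 : Int) + 1 else ((pvWin numbers m j).count 0 : Int)) - 1
        else (if X = 0 then ((pvWin numbers m j).count 0 : Int) + 1 else ((pvWin numbers m j).count 0 : Int)))
      = ((pvWin numbers m (j + 1)).count 0 : Int) := by
    rw [hc1, hc2]
    by_cases hx : X = 0 <;> by_cases hy : Y = 0 <;> simp [hx, hy]
  have hp2 : (if Y = 0
        then (if X = 0 then pvNZ (pvWin numbers m j) else pvNZ (pvWin numbers m j) * X)
        else PySem.Int.floordiv
          (if X = 0 then pvNZ (pvWin numbers m j) else pvNZ (pvWin numbers m j) * X) Y)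
      = pvNZ (pvWin numbers m (j + 1)) := by
    rw [hn1, hn2]
    by_cases hx : X = 0 <;> by_cases hy : Y = 0
    · simp [hx, hy]
    · simp [hx, hy]
      exact Int.mul_fdiv_cancel_left _ hy
    · simp [hx, hy]
    · simp [hx, hy]
      rw [mul_assoc]
      exact Int.mul_fdiv_cancel_left _ hy
  simp only [mpfn_step, hxi, hyi, PySem.List.pyGetD_natCast,
    List.getD_eq_getElem numbers 0 hmj, List.getD_eq_getElem numbers 0 hjlt, ← hX, ← hY]
  rw [hz2, hp2]
  have hcur : (if ((pvWin numbers m (j + 1)).count 0 : Int) = 0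
      then pvNZ (pvWin numbers m (j + 1)) else 0) = (pvWin numbers m (j + 1)).prod := by
    rw [pv_prod_char (pvWin numbers m (j + 1))]
    by_cases hz : (pvWin numbers m (j + 1)).count 0 = 0 <;> simp [hz]
  rw [hcur, pv_if_gt_eq_max]

theorem pv_Bfold (numbers : List Int) (m : Nat) (hm : 1 ≤ m) :
    ∀ (k j : Nat), m + j + k = numbers.length →
    ((PySem.List.pyRange ((m : Int) + (j : Int)) ((numbers.length : Nat) : Int) 1).foldl
        (mpfn_step numbers (m : Int))
        (((pvWin numbers m j).count 0 : Int), pvNZ (pvWin numbers m j), pvBest numbers m j)).2.2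
      = pvBest numbers m (j + k) := by
  intro k
  induction k with
  | zero =>
    intro j h
    rw [PySem.List.pyRange_one_eq_nil (by omega)]
    simp
  | succ k ih =>
    intro j h
    rw [PySem.List.pyRange_one_cons (by omega)]
    rw [List.foldl_cons, pv_step numbers m j _ hm (by omega), ← pvBest_succ]
    have hcast : (m : Int) + (j : Int) + 1 = (m : Int) + ((j + 1 : Nat) : Int) := by
      push_cast; ring
    rw [hcast, ih (j + 1) (by omega)]
    congr 1
    omega

theorem pv_foldl_max_one : ∀ (l : List Nat), (List.map (fun _ => (1 : Int)) l).foldl max 1 = 1 := by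
  intro l
  induction l with
  | nil => rfl
  | cons x t ih => simpa using ih

theorem pv_foldl_const {α β : Type} (f : β → α → β) (c : β) (h : ∀ a, f c a = c) :
    ∀ l : List α, l.foldl f c = c := by
  intro l
  induction l with
  | nil => rfl
  | cons x t ih => rw [List.foldl_cons, h x, ih]

theorem pv_step0 (numbers : List Int) (i : Int) :
    mpfn_step numbers 0 ((0 : Int), (1 : Int), (1 : Int)) i = (0, 1, 1) := by
  simp only [mpfn_step, Int.sub_zero]
  by_cases hx : PySem.List.pyGetD numbers i 0 = 0
  · simp [hx]
  · have hd : PySem.Int.floordiv (1 * PySem.List.pyGetD numbers i 0)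
        (PySem.List.pyGetD numbers i 0) = 1 := by
      have h2 : (PySem.List.pyGetD numbers i 0 * 1).fdiv (PySem.List.pyGetD numbers i 0) = 1 :=
        Int.mul_fdiv_cancel_left 1 hx
      rw [mul_one] at h2
      rw [one_mul]
      exact h2
    rw [one_mul] at hd
    simp [hx, hd]

theorem pv_B_eq (numbers : List Int) (m : Nat) (h : m ≤ numbers.length) :
    max_product_for_numbers_alt numbers (m : Int) = pvBest numbers m (numbers.length - m) := by
  by_cases hm : 1 ≤ m
  · unfold max_product_for_numbers_alt
    rw [PySem.List.slice_to_natCast]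
    have htake : numbers.take m = pvWin numbers m 0 := by simp [pvWin]
    rw [htake, pv_initfold]
    simp only [zero_add, one_mul]
    have hbest : (if ((pvWin numbers m 0).count 0 : Int) = 0
        then pvNZ (pvWin numbers m 0) else 0) = pvBest numbers m 0 := by
      have hb0 : pvBest numbers m 0 = (pvWin numbers m 0).prod := by simp [pvBest]
      rw [hb0, pv_prod_char (pvWin numbers m 0)]
      by_cases hz : (pvWin numbers m 0).count 0 = 0
      · rw [if_pos hz, if_pos (by exact_mod_cast hz)]
      · rw [if_neg hz, if_neg (by exact_mod_cast hz)]
    rw [hbest]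
    have hB := pv_Bfold numbers m hm (numbers.length - m) 0 (by omega)
    simp only [Nat.cast_zero, add_zero, Nat.zero_add] at hB
    exact hB
  · have hm0 : m = 0 := by omega
    subst hm0
    unfold max_product_for_numbers_alt
    rw [PySem.List.slice_to_natCast]
    simp only [Nat.cast_zero, List.take_zero, List.foldl_nil]
    norm_num
    rw [pv_foldl_const (mpfn_step numbers 0) ((0 : Int), (1 : Int), (1 : Int))
      (pv_step0 numbers)]
    unfold pvBest
    have hwin : ∀ t, pvWin numbers 0 t = [] := fun t => by simp [pvWin]
    have hmap : List.map (fun t => (pvWin numbers 0 (t + 1)).prod)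
        (List.range numbers.length)
        = List.map (fun _ => (1 : Int)) (List.range numbers.length) := by
      apply List.map_congr_left
      intro a _
      rw [hwin]
      rfl
    rw [hmap, hwin 0]
    simpa using (pv_foldl_max_one (List.range numbers.length)).symm

-- ===== VERDICT (by name: the statement is the Claim_ definition above) =====
theorem max_product_for_numbers_spec : Claim_equal_max_product_for_numbers := by
  intro numbers n _ hpre
  have h0 : 0 ≤ n := hpre.1
  have hL : n ≤ (numbers.length : Int) := hpre.2
  unfold Spec_max_product_for_numbers
  have hn : n = (n.toNat : Int) := (Int.toNat_of_nonneg h0).symm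
  rw [hn, pv_A_eq numbers n.toNat (by omega), pv_B_eq numbers n.toNat (by omega)]
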